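-- pv_equiv track=rewrite | github.com/hkalexling/ttz | tools/country.py | generate_token_strs
-- ===== SOURCE A (Python) =====
-- def str_to_codes(s):
--     s = s.lower()
--     codes = []
--
--     for c in s:
--         value = ord(c) - ord('a') + 1
--         if value > 26 or value < 1:
--             continue
--         codes.append(value)
--
--     return codes
--
-- def generate_token_strs(tokens):
--     token_codes = [str_to_codes(t) for t in tokens]
--     token_sizes = [len(c) for c in token_codes]
--     token_offsets = [sum(token_sizes[:i]) for i in range(len(token_sizes) + 1)]
--     token_array_size = sum(token_sizes)
--
--     tokens_h_str = 'extern const uint5_array_t ttz_tokens;'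
--
--     tokens_str = f'const uint5_t tokens_data[{token_array_size}] = {{\n'
--     for i, codes in enumerate(token_codes):
--         tokens_str += f'  {", ".join(map(lambda c: f"{{{c}}}", codes))}, // {tokens[i]}\n'
--     tokens_str += '};\n\n'
--
--     tokens_str += f'const uint16_t tokens_offsets[{len(tokens) + 1}] = {{\n'
--     for i, offset in enumerate(token_offsets):
--         comment = tokens[i] if i < len(tokens) else "end"
--         tokens_str += f'  {offset}, // {comment}\n'
--     tokens_str += '};\n\n'
--
--     tokens_str += 'const uint5_array_t ttz_tokens = {\n'
--     tokens_str += f'  {sum(token_sizes)}, // size\n'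
--     tokens_str += '  tokens_data, // data\n'
--     tokens_str += '  tokens_offsets // offsets\n'
--     tokens_str += '};\n'
--
--     return tokens_h_str, tokens_str, token_array_size, max(token_sizes)
-- ===== SOURCE B (Python) =====
-- def _codes(s):
--     return [ord(c) - 96 for c in s.lower() if 97 <= ord(c) <= 122]
--
-- def generate_token_strs(tokens):
--     data_lines = []
--     off_lines = []
--     offset = 0
--     max_size = 0
--     for t in tokens:
--         codes = _codes(t)
--         data_lines.append('  ' + ', '.join('{%d}' % c for c in codes) + ', // ' + t + '\n')
--         off_lines.append('  %d, // %s\n' % (offset, t))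
--         offset += len(codes)
--         if len(codes) > max_size:
--             max_size = len(codes)
--     off_lines.append('  %d, // end\n' % offset)
--     tokens_str = (
--         'const uint5_t tokens_data[%d] = {\n' % offset + ''.join(data_lines)
--         + '};\n\n'
--         + 'const uint16_t tokens_offsets[%d] = {\n' % (len(tokens) + 1) + ''.join(off_lines)
--         + '};\n\n'
--         + 'const uint5_array_t ttz_tokens = {\n'
--         + '  %d, // size\n' % offset
--         + '  tokens_data, // data\n'
--         + '  tokens_offsets // offsets\n'
--         + '};\n'
--     )
--     return 'extern const uint5_array_t ttz_tokens;', tokens_str, offset, max_size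
-- ===== Notes on version B (the rewrite author's own statement) =====
-- stated objective: faster
-- what changed: single pass keeping a running offset and running max instead of recomputing sum(token_sizes[:i]) for every i, and lines are collected and joined instead of repeated string +=
import Mathlib
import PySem

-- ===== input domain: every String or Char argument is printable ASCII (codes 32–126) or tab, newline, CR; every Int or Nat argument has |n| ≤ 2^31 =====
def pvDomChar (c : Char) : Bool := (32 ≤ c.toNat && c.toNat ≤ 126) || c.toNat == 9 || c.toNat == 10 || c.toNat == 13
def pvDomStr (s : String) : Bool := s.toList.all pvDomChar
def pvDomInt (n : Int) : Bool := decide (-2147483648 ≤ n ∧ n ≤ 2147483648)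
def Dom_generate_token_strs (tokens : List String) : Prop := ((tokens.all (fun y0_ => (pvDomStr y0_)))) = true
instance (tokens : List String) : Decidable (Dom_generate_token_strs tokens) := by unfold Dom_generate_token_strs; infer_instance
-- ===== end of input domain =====

-- B replaces A's quadratic re-summation sum(token_sizes[:i]) by a single pass with a running
-- offset and running max, collecting lines and joining them once; return values agree on every
-- nonempty token list (A raises ValueError on [] — excluded by Pre_).

-- ===== PORT A =====
def str_to_codes (s : String) : List Int :=
  let s := PySem.Str.lower s
  s.toList.foldl (fun codes c =>
    let value : Int := (c.toNat : Int) - 97 + 1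
    if value > 26 ∨ value < 1 then codes else codes ++ [value]) []

def generate_token_strs (tokens : List String) : String × String × Int × Int :=
  let token_codes := tokens.map str_to_codes
  let token_sizes := token_codes.map (fun c => (c.length : Int))
  let token_offsets := (PySem.List.pyRange 0 ((token_sizes.length : Int) + 1) 1).map
      (fun i => (PySem.List.slice token_sizes none (some i)).sum)
  let token_array_size := token_sizes.sum
  let tokens_h_str := "extern const uint5_array_t ttz_tokens;"
  let tokens_str := "const uint5_t tokens_data[" ++ PySem.Int.toStr token_array_size ++ "] = {\n"
  let tokens_str := (PySem.List.enumerate token_codes 0).foldl (fun s p =>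
      s ++ ("  " ++ PySem.Str.join ", " (p.2.map (fun c => "{" ++ PySem.Int.toStr c ++ "}"))
        ++ ", // " ++ PySem.List.pyGetD tokens p.1 "" ++ "\n")) tokens_str
  let tokens_str := tokens_str ++ "};\n\n"
  let tokens_str := tokens_str ++ ("const uint16_t tokens_offsets["
      ++ PySem.Int.toStr ((tokens.length : Int) + 1) ++ "] = {\n")
  let tokens_str := (PySem.List.enumerate token_offsets 0).foldl (fun s p =>
      let comment := if p.1 < (tokens.length : Int) then PySem.List.pyGetD tokens p.1 "" else "end"
      s ++ ("  " ++ PySem.Int.toStr p.2 ++ ", // " ++ comment ++ "\n")) tokens_str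
  let tokens_str := tokens_str ++ "};\n\n"
  let tokens_str := tokens_str ++ "const uint5_array_t ttz_tokens = {\n"
  let tokens_str := tokens_str ++ ("  " ++ PySem.Int.toStr token_sizes.sum ++ ", // size\n")
  let tokens_str := tokens_str ++ "  tokens_data, // data\n"
  let tokens_str := tokens_str ++ "  tokens_offsets // offsets\n"
  let tokens_str := tokens_str ++ "};\n"
  -- max(token_sizes) raises ValueError on the empty list (excluded by Pre_); the .getD 0 default is unreachable under Pre_
  (tokens_h_str, tokens_str, token_array_size, (PySem.List.max? token_sizes (fun x => x)).getD 0)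

-- ===== PORT B =====
def codesB (s : String) : List Int :=
  ((PySem.Str.lower s).toList.filter (fun c => 97 ≤ c.toNat && c.toNat ≤ 122)).map
    (fun c => (c.toNat : Int) - 96)

def generate_token_strs_alt (tokens : List String) : String × String × Int × Int :=
  let st := tokens.foldl (fun (st : List String × List String × Int × Int) t =>
      let codes := codesB t
      let dl := st.1 ++ ["  " ++ PySem.Str.join ", " (codes.map (fun c => "{" ++ PySem.Int.toStr c ++ "}")) ++ ", // " ++ t ++ "\n"]
      let ol := st.2.1 ++ ["  " ++ PySem.Int.toStr st.2.2.1 ++ ", // " ++ t ++ "\n"]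
      let off := st.2.2.1 + (codes.length : Int)
      let mx := if (codes.length : Int) > st.2.2.2 then (codes.length : Int) else st.2.2.2
      (dl, ol, off, mx)) ([], [], 0, 0)
  let off_lines := st.2.1 ++ ["  " ++ PySem.Int.toStr st.2.2.1 ++ ", // end\n"]
  let tokens_str :=
    "const uint5_t tokens_data[" ++ PySem.Int.toStr st.2.2.1 ++ "] = {\n" ++ PySem.Str.join "" st.1
    ++ "};\n\n"
    ++ "const uint16_t tokens_offsets[" ++ PySem.Int.toStr ((tokens.length : Int) + 1) ++ "] = {\n"
    ++ PySem.Str.join "" off_lines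
    ++ "};\n\n"
    ++ "const uint5_array_t ttz_tokens = {\n"
    ++ "  " ++ PySem.Int.toStr st.2.2.1 ++ ", // size\n"
    ++ "  tokens_data, // data\n"
    ++ "  tokens_offsets // offsets\n"
    ++ "};\n"
  ("extern const uint5_array_t ttz_tokens;", tokens_str, st.2.2.1, st.2.2.2)

-- ===== PRECONDITION & SPEC =====
-- Pre_ excludes exactly the empty token list, on which Python A raises ValueError (max() of an empty sequence).
def Pre_generate_token_strs (tokens : List String) : Prop := tokens ≠ []
instance (tokens : List String) : Decidable (Pre_generate_token_strs tokens) := by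
  unfold Pre_generate_token_strs; infer_instance
def pvWitness_generate_token_strs : List String := ["hi"]

def Spec_generate_token_strs (tokens : List String) (out : String × String × Int × Int) : Prop :=
  out = generate_token_strs_alt tokens
instance (tokens : List String) (out : String × String × Int × Int) :
    Decidable (Spec_generate_token_strs tokens out) := by
  unfold Spec_generate_token_strs; infer_instance

-- ===== CLAIM (what is proved, stated in full; the proofs are below) =====
def Claim_equal_generate_token_strs : Prop := ∀ (tokens : List String),
  Dom_generate_token_strs tokens → Pre_generate_token_strs tokens →
    Spec_generate_token_strs tokens (generate_token_strs tokens)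
-- ===== LEMMAS AND PROOFS =====

theorem codes_aux (l : List Char) (acc : List Int) :
    l.foldl (fun codes c =>
      let value : Int := (c.toNat : Int) - 97 + 1
      if value > 26 ∨ value < 1 then codes else codes ++ [value]) acc
    = acc ++ (l.filter (fun c => 97 ≤ c.toNat && c.toNat ≤ 122)).map (fun c => (c.toNat : Int) - 96) := by
  induction l generalizing acc with
  | nil => simp
  | cons c cs ih =>
    simp only [List.foldl_cons, List.filter_cons]
    by_cases h : (97 ≤ c.toNat && c.toNat ≤ 122) = true
    · simp only [h, if_pos, List.map_cons]
      have h' : ¬ ((c.toNat : Int) - 97 + 1 > 26 ∨ (c.toNat : Int) - 97 + 1 < 1) := by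
        simp at h; omega
      rw [if_neg h', ih]
      have h96 : (c.toNat : Int) - 97 + 1 = (c.toNat : Int) - 96 := by omega
      simp [h96]
    · simp only [h]
      have h' : ((c.toNat : Int) - 97 + 1 > 26 ∨ (c.toNat : Int) - 97 + 1 < 1) := by
        simp at h
        rcases Nat.lt_or_ge c.toNat 97 with hl | hg
        · right; omega
        · left; have := h hg; omega
      rw [if_pos h', ih]
      simp

theorem codesB_eq (s : String) : codesB s = str_to_codes s := by
  rw [codesB, str_to_codes]
  rw [codes_aux]
  simp

-- helper definitions for the proofs
def dataLine (t : String) : String :=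
  "  " ++ PySem.Str.join ", " ((str_to_codes t).map (fun c => "{" ++ PySem.Int.toStr c ++ "}")) ++ ", // " ++ t ++ "\n"
def offLine (o : Int) (c : String) : String :=
  "  " ++ PySem.Int.toStr o ++ ", // " ++ c ++ "\n"
def szs (ts : List String) : List Int := ts.map (fun t => ((str_to_codes t).length : Int))
def offLinesOf : List String → Int → List String
  | [], _ => []
  | t :: ts, o => offLine o t :: offLinesOf ts (o + ((str_to_codes t).length : Int))

theorem bfold (ts : List String) (dl ol : List String) (off mx : Int) :
    ts.foldl (fun (st : List String × List String × Int × Int) t =>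
      (st.1 ++ ["  " ++ PySem.Str.join ", " ((codesB t).map (fun c => "{" ++ PySem.Int.toStr c ++ "}")) ++ ", // " ++ t ++ "\n"],
       st.2.1 ++ ["  " ++ PySem.Int.toStr st.2.2.1 ++ ", // " ++ t ++ "\n"],
       st.2.2.1 + ((codesB t).length : Int),
       if ((codesB t).length : Int) > st.2.2.2 then ((codesB t).length : Int) else st.2.2.2))
      (dl, ol, off, mx)
    = (dl ++ ts.map dataLine, ol ++ offLinesOf ts off, off + (szs ts).sum,
       (szs ts).foldl (fun m s => if s > m then s else m) mx) := by
  induction ts generalizing dl ol off mx with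
  | nil => simp [szs, offLinesOf]
  | cons t ts ih =>
    simp only [List.foldl_cons]
    rw [ih]
    simp only [szs, List.map_cons, List.sum_cons, List.foldl_cons, offLinesOf, dataLine,
      offLine, codesB_eq, Prod.mk.injEq, List.append_assoc, List.singleton_append]
    refine ⟨trivial, trivial, by ring, trivial⟩

theorem flatten_intersperse_nil {α : Type} (l : List (List α)) :
    (List.intersperse [] l).flatten = l.flatten := by
  induction l with
  | nil => rfl
  | cons x xs ih =>
    cases xs with
    | nil => rfl
    | cons y ys => simp_all [List.intersperse]

theorem join_nil_cons (p : String) (parts : List String) :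
    PySem.Str.join "" (p :: parts) = p ++ PySem.Str.join "" parts := by
  apply String.toList_inj.mp
  simp [PySem.Str.join, PySem.Chars.join, List.intercalate, flatten_intersperse_nil]

theorem strFoldl {α : Type} (l : List α) (g : α → String) (s : String) :
    l.foldl (fun acc x => acc ++ g x) s = s ++ PySem.Str.join "" (l.map g) := by
  induction l generalizing s with
  | nil => apply String.toList_inj.mp; simp [PySem.Str.join, PySem.Chars.join, List.intercalate]
  | cons x xs ih =>
    simp only [List.foldl_cons, List.map_cons, ih, join_nil_cons]
    apply String.toList_inj.mp; simp

-- ===== VERDICT (by name: the statement is the Claim_ definition above) =====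
theorem szs_def (tokens : List String) :
    tokens.map (fun t => ((str_to_codes t).length : Int)) = szs tokens := rfl

theorem szs_len (tokens : List String) : (szs tokens).length = tokens.length := by
  simp [szs]

theorem offLinesOf_len (ts : List String) (o : Int) : (offLinesOf ts o).length = ts.length := by
  induction ts generalizing o with
  | nil => rfl
  | cons t ts ih => simp [offLinesOf, ih]

theorem offLinesOf_getElem (ts : List String) (o : Int) (k : Nat) (hk : k < ts.length) :
    (offLinesOf ts o)[k]'(by rw [offLinesOf_len]; exact hk)
      = offLine (o + ((szs ts).take k).sum) ts[k] := by
  induction ts generalizing o k with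
  | nil => simp at hk
  | cons t ts ih =>
    cases k with
    | zero => simp [offLinesOf, szs]
    | succ k =>
      have hk' : k < ts.length := by simpa using hk
      simp only [offLinesOf, List.getElem_cons_succ]
      rw [ih _ k hk']
      have harith : o + ((str_to_codes t).length : Int) + ((szs ts).take k).sum
          = o + ((szs (t :: ts)).take (k + 1)).sum := by
        simp [szs, List.take_succ_cons]; ring
      simp [harith]

theorem mapA_data (tokens : List String) :
    (PySem.List.enumerate (tokens.map str_to_codes)).map
      (fun p => "  " ++ PySem.Str.join ", " (p.2.map (fun c => "{" ++ PySem.Int.toStr c ++ "}"))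
        ++ ", // " ++ PySem.List.pyGetD tokens p.1 "" ++ "\n")
    = tokens.map dataLine := by
  apply List.ext_getElem
  · simp [PySem.List.length_enumerate]
  · intro k h1 h2
    have hk : k < tokens.length := by simpa using h2
    have hk' : k < (tokens.map str_to_codes).length := by simpa using hk
    simp only [List.getElem_map, PySem.List.getElem_enumerate, zero_add]
    rw [PySem.List.pyGetD_natCast, List.getD_eq_getElem tokens "" hk]
    simp [dataLine]

theorem mapA_off (tokens : List String) :
    (PySem.List.enumerate ((PySem.List.pyRange 0 (((szs tokens).length : Int) + 1) 1).map
        (fun i => (PySem.List.slice (szs tokens) none (some i)).sum))).map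
      (fun p => "  " ++ PySem.Int.toStr p.2 ++ ", // "
        ++ (if p.1 < (tokens.length : Int) then PySem.List.pyGetD tokens p.1 "" else "end") ++ "\n")
    = offLinesOf tokens 0 ++ [offLine (szs tokens).sum "end"] := by
  have hrange : PySem.List.pyRange 0 (((szs tokens).length : Int) + 1) 1
      = (List.range (tokens.length + 1)).map (fun (k : Nat) => (k : Int)) := by
    apply List.ext_getElem
    · simp [PySem.List.length_pyRange_one, szs_len]
    · intro k h1 h2
      simp [PySem.List.getElem_pyRange_one]
  rw [hrange]
  apply List.ext_getElem
  · simp [PySem.List.length_enumerate, offLinesOf_len]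
  · intro k h1 h2
    have hk : k < tokens.length + 1 := by simpa [PySem.List.length_enumerate] using h1
    simp only [List.getElem_map, PySem.List.getElem_enumerate, List.getElem_range, zero_add,
      PySem.List.slice_to_natCast]
    by_cases hlt : k < tokens.length
    · have hcast : ((k : Int)) < (tokens.length : Int) := by exact_mod_cast hlt
      rw [if_pos hcast, PySem.List.pyGetD_natCast, List.getD_eq_getElem tokens "" hlt]
      rw [List.getElem_append_left (by rw [offLinesOf_len]; exact hlt)]
      rw [offLinesOf_getElem tokens 0 k hlt]
      simp [offLine]
    · have hkn : k = tokens.length := by omega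
      subst hkn
      rw [if_neg (lt_irrefl _)]
      rw [List.getElem_append_right (by rw [offLinesOf_len])]
      have : (szs tokens).take tokens.length = szs tokens := by
        apply List.take_of_length_le; rw [szs_len]
      rw [this]
      simp [offLinesOf_len, offLine]

theorem maxA (tokens : List String) (h : tokens ≠ []) :
    (PySem.List.max? (szs tokens) (fun x => x)).getD 0
      = (szs tokens).foldl (fun m s => if s > m then s else m) 0 := by
  have hstep : (fun (m s : Int) => if s > m then s else m) = (fun (m s : Int) => max m s) := by
    funext m s
    simp only [max_def]
    split_ifs <;> omega
  rw [hstep]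
  obtain ⟨t, ts, rfl⟩ := List.exists_cons_of_ne_nil h
  have : szs (t :: ts) = ((str_to_codes t).length : Int) :: szs ts := by simp [szs]
  rw [this, PySem.List.max?_id_cons]
  simp only [Option.getD_some, List.foldl_cons]
  have : max 0 ((str_to_codes t).length : Int) = ((str_to_codes t).length : Int) := by
    simp
  rw [this]

set_option maxRecDepth 16000 in
set_option maxHeartbeats 2000000 in
theorem main_eq (tokens : List String) (h : tokens ≠ []) :
    generate_token_strs tokens = generate_token_strs_alt tokens := by
  simp only [generate_token_strs, generate_token_strs_alt]
  rw [bfold]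
  simp only [List.map_map, Function.comp_def, szs_def, List.nil_append, zero_add]
  rw [strFoldl, strFoldl, mapA_data, mapA_off]
  refine Prod.ext rfl (Prod.ext ?_ (Prod.ext rfl (maxA tokens h)))
  apply String.toList_inj.mp
  simp [offLine, PySem.Int.toList_toStr, List.append_assoc]

set_option maxHeartbeats 2000000 in
theorem generate_token_strs_spec : Claim_equal_generate_token_strs := by
  intro tokens _ hpre
  unfold Spec_generate_token_strs
  exact main_eq tokens hpre
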